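/- GENERATED by mk_final_copies.py from the proof of the farm's unit `codebook_decode` (farm:codebook_decode.1: Lemmas.lean) as the
   re-elaboration sweep compiled it — do not edit. -/
/-
  LEMMAS OF THE UNIT `codebook_decode` (0x10e7a0 … 0x10e8fa, stb_vorbis_fixed.c:1823 – 1859).
    * pure facts about the 32-bit forms the walker leaves (counter, `len'`, `z·d`, the two element addresses);
    * `reader_of_windows`, `book_where`, `pre_start`: the call of codebook_decode_start at 0x10e7b8;
    * `at_loop_entry`: the memory part of the loop invariants at the two loop entries;
    * `loop_seq_ok` (0x10e867, the `sequence_p` arm) and `loop_plain_ok` (0x10e8e5): each loop from its head to the `ret`.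
-/
import Asan.CheckWalk
import Vorbis.Spec.Units.codebook_decode

open X86 X86.User Asan Vorbis Vorbis.Spec

set_option maxRecDepth 4000
set_option maxHeartbeats 4000000

namespace Vorbis.Spec.codebook_decode

/-- The number in a word made from a small number. -/
theorem toNat_ofNat_small (i : Nat) (h : i < 2 ^ 64) : (UInt64.ofNat i).toNat = i := by
  rw [UInt64.toNat_ofNat']
  exact Nat.mod_eq_of_lt h

/-- `jg` taken after `cmp r14d, r12d`: the counter is below `len'`. -/
theorem lt_of_jg (i n : Nat) (L14 : Word) (hi31 : i < 2 ^ 31) (hL14 : (argInt L14).toNat = n)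
    (h : (Word.part .w32 (UInt64.ofNat i)).toInt < (Word.part .w32 L14).toInt) : i < n := by
  rw [part32_toInt, part32_toInt, toNat_ofNat_small i (by omega)] at h
  have e : i % 2 ^ 32 = i := Nat.mod_eq_of_lt (by omega)
  rw [e] at h
  have hc := sint32_cases i
  have hL : argInt L14 = sint32 (L14.toNat % 2 ^ 32) := rfl
  rw [hL] at hL14
  omega

/-- `add r12d, 1`: the counter goes up by one. -/
theorem counter_inc (i : Nat) (h : i + 1 < 2 ^ 32) :
    Word.ofBV (Word.part .w32 (UInt64.ofNat i) + 1#32) = UInt64.ofNat (i + 1) := by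
  apply UInt64.toNat_inj.mp
  rw [Vorbis.toNat_ofBV32, BitVec.toNat_add, part32_toNat, toNat_ofNat_small i (by omega),
    toNat_ofNat_small (i + 1) (by omega)]
  have e1 : (1#32).toNat = 1 := by decide
  rw [e1]
  omega

/-- The address of `multiplicands[z·d + i]` as the walker builds it (`lea ebx,[r12+r15] ; movsxd ; shl 2 ; add [rbp+20H]`). -/
theorem addr_mult (i zd mp : Nat) (R15 : Word) (hR : R15.toNat = zd) (h1 : zd + i < 2 ^ 31) (h2 : mp + 4 * (zd + i) < 2 ^ 64) :
    (Word.ofBV (BitVec.signExtend 64 (BitVec.setWidth 32 (UInt64.ofNat i + R15).toBitVec)) <<< 2 + UInt64.ofNat mp).toNat =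
      mp + 4 * (zd + i) := by
  have e : (UInt64.ofNat i + R15).toNat % 2 ^ 32 = zd + i := by
    rw [UInt64.toNat_add, toNat_ofNat_small i (by omega), hR]
    omega
  have h := sext32_shl2_add (UInt64.ofNat i + R15) mp (by omega) (by omega)
  rw [e] at h
  exact h

/-- The address of `output[i]` as the walker builds it (`movsxd rax, r12d ; lea rbx, [rdx + rax*4]`). -/
theorem addr_out (p : Word) (i : Nat) (hi : i < 2 ^ 31) (h : p.toNat + 4 * i < 2 ^ 64) :
    (p + Word.ofBV (BitVec.signExtend 64 (Word.part .w32 (UInt64.ofNat i))) * 4).toNat = p.toNat + 4 * i := by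
  have e : (Word.part .w32 (UInt64.ofNat i)).toNat = i := by
    rw [part32_toNat, toNat_ofNat_small i (by omega)]
    omega
  have hx : (Word.ofBV (BitVec.signExtend 64 (Word.part .w32 (UInt64.ofNat i)))).toNat = i := by
    rw [toNat_sext32 _ (by omega), e]
  exact add_mul4 p _ i hx h

/-- `Bits` and μ over stores that all lie in windows off `*f` (the list form of `Reader.reader_of_window`): the function's own
stack stores and the float stores into the output window. -/
theorem reader_of_windows {Blk : Block → Prop} {len : Nat} {mem mem' : Mem} {f : Nat} {ws : List Span}
    (h : Bits Blk len mem f) (hs : Mem.SameExcept ws mem mem') (hoff : ∀ w, w ∈ ws → w.hi ≤ f ∨ f + 1808 ≤ w.lo) :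
    Bits Blk len mem' f ∧ mu mem' f = mu mem f := by
  have hr := h.OBR
  have hsame : ObjSame f mem mem' := by
    apply ObjSame.of_sameExcept hs (by omega)
    intro w hw
    have := hoff w hw
    omega
  exact ⟨h.frame hsame, mu_transfer (hsame.sub (by decide))⟩

/-- Where the struct at `c` is, as one arithmetic fact: above the text, inside the data space, off the stack below `rsp + 8`. -/
theorem book_where {others : List Obj} {frames : List (Nat × FrameLayout)} {Blk : Block → Prop} {len : Nat} {u : State}
    (h : BookPre others frames Blk len u) (htop : 0x700000 < (u.reg .rsp).toNat + 8) :
    0x119d40 ≤ (u.reg .rsi).toNat ∧ (u.reg .rsi).toNat + 2120 ≤ 0xC00000 ∧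
      ((u.reg .rsp).toNat + 8 ≤ (u.reg .rsi).toNat ∨ (u.reg .rsi).toNat + 2120 ≤ 0x700000 ∨
        0x800000 ≤ (u.reg .rsi).toNat) := by
  obtain ⟨B, hB, hin⟩ := h.book
  have hsite : Site (Live (stackObjs frames ++ others)) (u.reg .rsi).toNat 2120 :=
    Codebook.site_field h.reader.env.live hB hin 0 2120 (by decide) (by decide) rfl
  have hw := site_where h.reader.shadow.inv h.reader.shadow.offText htop hsite
  have e : L.textHi = 0x119d40 := rfl
  omega

/-- **The precondition of `codebook_decode_start` at the call 0x10e7b8**: the six pushes, the spill of `output` and the return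
address all lie in the 80 bytes below the entry stack pointer, off `*f`, the book and its `sorted_values` block. Also: the
fields of the book and μ read the same at the callee's entry. -/
theorem pre_start {others : List Obj} {frames : List (Nat × FrameLayout)} {Blk : Block → Prop} {len : Nat} {u s : State}
    (h : BookPre others frames Blk len u) (hroom : 0x700000 + 512 ≤ (u.reg .rsp).toNat)
    (hrdi : s.reg .rdi = u.reg .rdi) (hrsi : s.reg .rsi = u.reg .rsi)
    (hrsp : (s.reg .rsp).toNat = (u.reg .rsp).toNat - 80)
    (hs : Mem.SameExcept [⟨(u.reg .rsp).toNat - 80, (u.reg .rsp).toNat⟩] u.mem s.mem)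
    (hun : ShadowUntouched u.mem s.mem) :
    BookPre others frames Blk len s ∧ Codebook.SameFields u.mem s.mem (u.reg .rsi).toNat ∧
      mu s.mem (u.reg .rdi).toNat = mu u.mem (u.reg .rdi).toNat := by
  have hsh := h.reader.shadow
  have hsp := hsh.rsp
  have hwf := h.reader.where_obj
  have hwc := book_where h (by omega)
  have hsh' : ShadowPre others frames s := hsh.callee hun (by omega) (by omega) (by omega)
  have hbits := Reader.reader_of_window h.reader.bits hs (by omega)
  obtain ⟨B, hB, hin⟩ := h.book
  have hd1 : ∀ w, w ∈ [(⟨(u.reg .rsp).toNat - 80, (u.reg .rsp).toNat⟩ : Span)] →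
      (u.reg .rsi).toNat + Off.sizeof.Codebook ≤ w.lo ∨ w.hi ≤ (u.reg .rsi).toNat := by
    intro w hw
    have e : w = ⟨(u.reg .rsp).toNat - 80, (u.reg .rsp).toNat⟩ := List.mem_singleton.mp hw
    subst e
    simp only [voff]
    omega
  have hkept : (Codebook.block (u.reg .rsi).toNat).Kept u.mem s.mem :=
    Block.Kept.of_sameExcept hs hd1 (Codebook.block_no_wrap h.ok hB hin)
  refine ⟨h.carry hsh' hrdi hrsi hbits.1 hs hd1 ?_, Codebook.SameFields.of_kept hkept, hbits.2⟩
  intro hse w hw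
  have e : w = ⟨(u.reg .rsp).toNat - 80, (u.reg .rsp).toNat⟩ := List.mem_singleton.mp hw
  subst e
  have hwv := blk_where h.reader.env.live hsh.inv hsh.offText (by omega) (h.cb.K4.sv hse) (by simp only []; omega)
  simp only [] at hwv ⊢
  omega


/-- `imul r15d, ebx` (0x10e7db): `z · dimensions`, no 32-bit wrap (K6). -/
theorem r15_toNat (D : Nat) (zr : Word) (hD : D < 2 ^ 32) (hz : zr.toNat < 2 ^ 32) (hlt : zr.toNat * D < 2 ^ 32) :
    (Word.ofBV (BitVec.ofNat 32 D * Word.part .w32 zr)).toNat = zr.toNat * D := by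
  rw [Vorbis.toNat_ofBV32, BitVec.toNat_mul, BitVec.toNat_ofNat, part32_toNat, Nat.mod_eq_of_lt hD, Nat.mod_eq_of_lt hz,
    Nat.mul_comm D]
  exact Nat.mod_eq_of_lt hlt

/-- `cmp r15d, r14d ; jge` taken (0x10e7d6): `len ≤ dimensions`, r14d keeps `len`. -/
theorem len_keep (rcx : Word) (D n : Nat) (hD : D < 2 ^ 31) (hn : (min (argInt rcx) (sint32 D)).toNat = n)
    (h : (Word.part .w32 rcx).toInt ≤ (BitVec.ofNat 32 D).toInt) :
    (argInt (Word.ofBV (Word.part .w32 rcx))).toNat = n := by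
  rw [part32_toInt, toInt_ofNat32 D (by omega)] at h
  have e : argInt (Word.ofBV (Word.part .w32 rcx)) = sint32 (rcx.toNat % 2 ^ 32) := by
    show sint32 ((Word.ofBV (Word.part .w32 rcx)).toNat % 2 ^ 32) = _
    rw [Vorbis.toNat_ofBV32, part32_toNat, Nat.mod_mod]
  rw [e]
  have e2 : argInt rcx = sint32 (rcx.toNat % 2 ^ 32) := rfl
  rw [e2] at hn
  omega

/-- `cmp r15d, r14d ; jge` not taken (0x10e7d8): `len > dimensions`, r14d := dimensions. -/
theorem len_clamp (rcx : Word) (D n : Nat) (hD : D < 2 ^ 31) (hn : (min (argInt rcx) (sint32 D)).toNat = n)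
    (h : ¬ (Word.part .w32 rcx).toInt ≤ (BitVec.ofNat 32 D).toInt) :
    (argInt (Word.ofBV (BitVec.ofNat 32 D))).toNat = n := by
  rw [part32_toInt, toInt_ofNat32 D (by omega)] at h
  have e : argInt (Word.ofBV (BitVec.ofNat 32 D)) = sint32 D := by
    show sint32 ((Word.ofBV (BitVec.ofNat 32 D)).toNat % 2 ^ 32) = _
    rw [Vorbis.toNat_ofBV32, BitVec.toNat_ofNat, Nat.mod_mod, Nat.mod_eq_of_lt (by omega)]
  rw [e]
  have e2 : argInt rcx = sint32 (rcx.toNat % 2 ^ 32) := rfl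
  rw [e2] at hn
  omega

/-- `js` not taken after `test eax, eax` (0x10e7bf): the 32-bit result is below `2^31`. -/
theorem lt_of_msb (zr : Word) (hhi : zr.toNat < 2 ^ 32) (hm : (Word.part .w32 zr).msb = false) : zr.toNat < 2 ^ 31 := by
  rw [BitVec.msb_eq_decide, part32_toNat] at hm
  simp only [decide_eq_false_iff_not, Nat.not_le, Width.bits] at hm
  omega

/-- A 32-bit result below `2^31` is its own value as an `int`. -/
theorem argInt_of_lt (zr : Word) (h : zr.toNat < 2 ^ 31) : argInt zr = (zr.toNat : Int) := by
  have e : argInt zr = sint32 (zr.toNat % 2 ^ 32) := rfl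
  rw [e]
  have hc := sint32_cases (zr.toNat % 2 ^ 32)
  omega


/-- **The memory part of the loop invariants at the two loop entries**: the state `s` at a loop head differs from the state `sr`
after the return of codebook_decode_start by the return address of the last check call only (`[rsp - 80, rsp - 72)`). -/
theorem at_loop_entry {others : List Obj} {frames : List (Nat × FrameLayout)} {Blk : Block → Prop} {len : Nat} {u : State} {ret : Word}
    (he_room : 7340032 + 512 ≤ (u.reg .rsp).toNat) (he_top : (u.reg .rsp).toNat + 8 ≤ 8388608)
    (hbook : BookPre others frames Blk len u)
    (n mp : Nat)
    (hwin : 0 < n → FloatWindow others frames u.mem (u.reg .rdi).toNat (u.reg .rsi).toNat (u.reg .rdx).toNat (4 * n))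
    (sr s : State) (v : Nat)
    (w_mem : s.mem = sr.mem.writeLE (u.reg .rsp - 80) 8 v)
    (hsameR : Mem.SameExcept [⟨(u.reg .rsp).toNat - 512, (u.reg .rsp).toNat⟩,
      ⟨(u.reg .rdi).toNat + 48, (u.reg .rdi).toNat + 56⟩, ⟨(u.reg .rdi).toNat + 84, (u.reg .rdi).toNat + 96⟩,
      ⟨(u.reg .rdi).toNat + 136, (u.reg .rdi).toNat + 144⟩, ⟨(u.reg .rdi).toNat + 1484, (u.reg .rdi).toNat + 1749⟩,
      ⟨(u.reg .rdi).toNat + 1752, (u.reg .rdi).toNat + 1784⟩,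
      ⟨(u.reg .rdx).toNat, (u.reg .rdx).toNat + 4 * n⟩] u.mem sr.mem)
    (hunR : ShadowUntouched u.mem sr.mem)
    (hrpR : ReaderPost Blk len u.mem sr.mem (u.reg .rdi).toNat)
    (hs0 : UInt64.ofNat (sr.mem.readLE (u.reg .rsp) 8) = ret)
    (hs1 : UInt64.ofNat (sr.mem.readLE (u.reg .rsp - 8) 8) = u.reg .r15)
    (hs2 : UInt64.ofNat (sr.mem.readLE (u.reg .rsp - 16) 8) = u.reg .r14)
    (hs3 : UInt64.ofNat (sr.mem.readLE (u.reg .rsp - 24) 8) = u.reg .r13)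
    (hs4 : UInt64.ofNat (sr.mem.readLE (u.reg .rsp - 32) 8) = u.reg .r12)
    (hs5 : UInt64.ofNat (sr.mem.readLE (u.reg .rsp - 40) 8) = u.reg .rbp)
    (hs6 : UInt64.ofNat (sr.mem.readLE (u.reg .rsp - 48) 8) = u.reg .rbx)
    (hsout : UInt64.ofNat (sr.mem.readLE (u.reg .rsp - 72) 8) = u.reg .rdx)
    (hM : sr.mem.readLE (u.reg .rsi + 32) 8 = mp) :
    Mem.SameExcept [⟨(u.reg .rsp).toNat - 512, (u.reg .rsp).toNat⟩,
      ⟨(u.reg .rdi).toNat + 48, (u.reg .rdi).toNat + 56⟩, ⟨(u.reg .rdi).toNat + 84, (u.reg .rdi).toNat + 96⟩,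
      ⟨(u.reg .rdi).toNat + 136, (u.reg .rdi).toNat + 144⟩, ⟨(u.reg .rdi).toNat + 1484, (u.reg .rdi).toNat + 1749⟩,
      ⟨(u.reg .rdi).toNat + 1752, (u.reg .rdi).toNat + 1784⟩,
      ⟨(u.reg .rdx).toNat, (u.reg .rdx).toNat + 4 * n⟩] u.mem s.mem ∧
    ShadowUntouched u.mem s.mem ∧
    ReaderPost Blk len u.mem s.mem (u.reg .rdi).toNat ∧
    UInt64.ofNat (s.mem.readLE (u.reg .rsp) 8) = ret ∧
    UInt64.ofNat (s.mem.readLE (u.reg .rsp - 8) 8) = u.reg .r15 ∧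
    UInt64.ofNat (s.mem.readLE (u.reg .rsp - 16) 8) = u.reg .r14 ∧
    UInt64.ofNat (s.mem.readLE (u.reg .rsp - 24) 8) = u.reg .r13 ∧
    UInt64.ofNat (s.mem.readLE (u.reg .rsp - 32) 8) = u.reg .r12 ∧
    UInt64.ofNat (s.mem.readLE (u.reg .rsp - 40) 8) = u.reg .rbp ∧
    UInt64.ofNat (s.mem.readLE (u.reg .rsp - 48) 8) = u.reg .rbx ∧
    UInt64.ofNat (s.mem.readLE (u.reg .rsp - 72) 8) = u.reg .rdx ∧
    s.mem.readLE (u.reg .rsi + 32) 8 = mp := by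
  have hsh : ShadowPre others frames u := hbook.reader.shadow
  have hsp := hsh.rsp
  have hwf := hbook.reader.where_obj
  have hwc := book_where hbook (by omega)
  have hwo : n = 0 ∨ (0x119d40 ≤ (u.reg .rdx).toNat ∧ (u.reg .rdx).toNat + 4 * n ≤ 0xC00000 ∧
      ((u.reg .rsp).toNat + 8 ≤ (u.reg .rdx).toNat ∨ (u.reg .rdx).toNat + 4 * n ≤ 0x700000 ∨
        0x800000 ≤ (u.reg .rdx).toNat)) := by
    by_cases hn0 : n = 0
    · exact Or.inl hn0
    · have hw := site_where hsh.inv hsh.offText (by omega) (hwin (by omega)).site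
      have etext : L.textHi = 0x119d40 := rfl
      exact Or.inr (by omega)
  have hrpS : ReaderPost Blk len sr.mem s.mem (u.reg .rdi).toNat := by
    rw [w_mem]
    exact (Reader.store_off_obj hrpR.bits (u.reg .rsp - 80) 8 v (by u_omega) (by u_omega)).1
  refine ⟨?_, ?_, hrpR.trans hrpS, ?_, ?_, ?_, ?_, ?_, ?_, ?_, ?_, ?_⟩
  · u_same
  · have hunR' : Mem.EqOn 0xC00000 0xE00000 u.mem sr.mem := hunR
    v_untouched
  · u_frame hs0
  · u_frame hs1
  · u_frame hs2
  · u_frame hs3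
  · u_frame hs4
  · u_frame hs5
  · u_frame hs6
  · u_frame hsout
  · u_frame hM


/-- The loop 0x10e867 (stb_vorbis_fixed.c:1846, the `sequence_p` arm). -/
theorem loop_seq_ok {Lay : Layout} (hLay : Lay.hi = 0x1000000) {μ : Microarch} (hμ : UserX.MicroOK μ) {u₀ : State}
    (hcode : HasCodeNat Lay u₀ Vorbis.L.codebook_decode.entry Vorbis.Code.code_codebook_decode.nat Vorbis.L.codebook_decode.size)
    (hload4 : Asan.SmallCheck Lay μ Vorbis.WayInv (Vorbis.CodeOK u₀) [.rax, .rcx, .rdx] 4 Vorbis.L.__asan_load4_noabort.entry)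
    (hload8 : Asan.SmallCheck Lay μ Vorbis.WayInv (Vorbis.CodeOK u₀) [.rax, .rcx, .rdx] 8 Vorbis.L.__asan_load8_noabort.entry)
    {others : List Obj} {frames : List (Nat × FrameLayout)} {Blk : Block → Prop} {len : Nat} {u : State} {ret : Word}
    (he_ret_lt : ret < 1073741824) (he_align : (u.reg .rsp).toNat % 8 = 0)
    (he_room : 7340032 + 512 ≤ (u.reg .rsp).toNat) (he_top : (u.reg .rsp).toNat + 8 ≤ 8388608)
    (he_stack : Lay.Has (u.reg .rsp - 512) 520)
    (hbook : BookPre others frames Blk len u)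
    (n D mp zd : Nat)
    (hn : decodeLen u.mem (u.reg .rsi).toNat (argInt (u.reg .rcx)) = n)
    (hwin : 0 < n → FloatWindow others frames u.mem (u.reg .rdi).toNat (u.reg .rsi).toNat (u.reg .rdx).toNat (4 * n))
    (hnD : n ≤ D) (hD1 : 1 ≤ D)
    (hmult : ∀ i, i < D → Site (Live (stackObjs frames ++ others)) (mp + 4 * (zd + i)) 4)
    (hidx : zd + D ≤ 0x20000000)
    (L14 R15 : Word) (hL14 : (argInt L14).toNat = n) (hR15 : R15.toNat = zd)
    (s : State) (i : Nat) (x13 : Word)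
    (w_rip : s.rip = Vorbis.L.codebook_decode.loop1)
    (w_r12 : s.reg .r12 = UInt64.ofNat i) (hi : i ≤ n) (hi31 : i < 2 ^ 31)
    (w_r13 : s.reg .r13 = x13)
    (w_r14 : s.reg .r14 = L14) (w_r15 : s.reg .r15 = R15)
    (w_rbp : s.reg .rbp = u.reg .rsi) (w_rsp : s.reg .rsp = u.reg .rsp - 72)
    (w_kept : RegsKept [.r12, .r13, .r15, .rbx, .r14, .rbp, .rsp, .rax, .rcx, .rdx, .rsi, .rdi, .r8,
      .r9, .r10, .r11, .r16, .r17, .r18, .r19, .r20, .r21, .r22, .r23, .r24,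
      .r25, .r26, .r27, .r28, .r29, .r30, .r31] u s)
    (w_eq : Mem.EqOn Vorbis.L.textLo Vorbis.L.textHi u₀.mem s.mem)
    (hsame : Mem.SameExcept [⟨(u.reg .rsp).toNat - 512, (u.reg .rsp).toNat⟩,
      ⟨(u.reg .rdi).toNat + 48, (u.reg .rdi).toNat + 56⟩, ⟨(u.reg .rdi).toNat + 84, (u.reg .rdi).toNat + 96⟩,
      ⟨(u.reg .rdi).toNat + 136, (u.reg .rdi).toNat + 144⟩, ⟨(u.reg .rdi).toNat + 1484, (u.reg .rdi).toNat + 1749⟩,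
      ⟨(u.reg .rdi).toNat + 1752, (u.reg .rdi).toNat + 1784⟩,
      ⟨(u.reg .rdx).toNat, (u.reg .rdx).toNat + 4 * n⟩] u.mem s.mem)
    (hun : ShadowUntouched u.mem s.mem)
    (hrp : ReaderPost Blk len u.mem s.mem (u.reg .rdi).toNat)
    (hs0 : UInt64.ofNat (s.mem.readLE (u.reg .rsp) 8) = ret)
    (hs1 : UInt64.ofNat (s.mem.readLE (u.reg .rsp - 8) 8) = u.reg .r15)
    (hs2 : UInt64.ofNat (s.mem.readLE (u.reg .rsp - 16) 8) = u.reg .r14)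
    (hs3 : UInt64.ofNat (s.mem.readLE (u.reg .rsp - 24) 8) = u.reg .r13)
    (hs4 : UInt64.ofNat (s.mem.readLE (u.reg .rsp - 32) 8) = u.reg .r12)
    (hs5 : UInt64.ofNat (s.mem.readLE (u.reg .rsp - 40) 8) = u.reg .rbp)
    (hs6 : UInt64.ofNat (s.mem.readLE (u.reg .rsp - 48) 8) = u.reg .rbx)
    (hsout : UInt64.ofNat (s.mem.readLE (u.reg .rsp - 72) 8) = u.reg .rdx)
    (hM : s.mem.readLE (u.reg .rsi + 32) 8 = mp)
    (hdf : s.flags .df = false) (hmx : s.mxcsr &&& 0x1F80 = 0x1F80) :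
    ReachVia Lay μ Vorbis.WayInv s (Returned (Vorbis.conv u₀) (codebook_decode.spec others frames Blk len) u ret) := by
  have hsh : ShadowPre others frames u := hbook.reader.shadow
  have hsp := hsh.rsp
  have hwf := hbook.reader.where_obj
  have hwc := book_where hbook (by omega)
  obtain ⟨B, hB, hin⟩ := hbook.book
  have hL := hbook.reader.env.live
  -- where the multiplicands are
  have hwm := site_where hsh.inv hsh.offText (by omega) (hmult 0 (by omega))
  have etext : L.textHi = 0x119d40 := rfl
  -- where the output window is, and what it does not meet: one arithmetic fact each (nothing is known when `len' = 0`)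
  have hwo : n = 0 ∨ (0x119d40 ≤ (u.reg .rdx).toNat ∧ (u.reg .rdx).toNat + 4 * n ≤ 0xC00000 ∧
      ((u.reg .rsp).toNat + 8 ≤ (u.reg .rdx).toNat ∨ (u.reg .rdx).toNat + 4 * n ≤ 0x700000 ∨
        0x800000 ≤ (u.reg .rdx).toNat)) := by
    by_cases hn0 : n = 0
    · exact Or.inl hn0
    · have hw := site_where hsh.inv hsh.offText (by omega) (hwin (by omega)).site
      exact Or.inr (by omega)
  have hoo : n = 0 ∨ ((u.reg .rdx).toNat + 4 * n ≤ (u.reg .rdi).toNat ∨ (u.reg .rdi).toNat + 1808 ≤ (u.reg .rdx).toNat) := by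
    by_cases hn0 : n = 0
    · exact Or.inl hn0
    · have hw := (hwin (by omega)).offObj
      simp only [vblock, voff] at hw
      exact Or.inr hw
  have hob : n = 0 ∨ ((u.reg .rdx).toNat + 4 * n ≤ (u.reg .rsi).toNat ∨ (u.reg .rsi).toNat + 2120 ≤ (u.reg .rdx).toNat) := by
    by_cases hn0 : n = 0
    · exact Or.inl hn0
    · have hw := (hwin (by omega)).offBook
      simp only [vblock, voff] at hw
      exact Or.inr hw
  u_loop [i, x13] (fun v => n - (v.reg .r12).toNat)
  -- the two element addresses of this round, as numbers
  have haddr1 := addr_mult i zd mp R15 hR15 (by omega) (by omega)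
  have haddr2 : (u.reg .rdx + Word.ofBV (BitVec.signExtend 64 (Word.part .w32 (UInt64.ofNat i))) * 4).toNat =
      (u.reg .rdx).toNat + 4 * i := by
    have hlt := (u.reg .rdx).toNat_lt
    exact addr_out _ i hi31 (by omega)
  u_walk hcode [hμ.vendor] until [Vorbis.L.codebook_decode.loop1] span [Vorbis.L.textLo, Vorbis.L.textHi] side (v_side)
  case check_10e801 =>
    -- 0x10e801 load8 c+0x20 (multiplicands): inside the struct at c
    have hlt := lt_of_jg i n L14 hi31 hL14 hbr_10e86a
    have hun' : ShadowUntouched u.mem s_10e801.mem := by v_untouched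
    refine check_site hsh.inv hun' (Codebook.site_field hL hB hin 32 8 (by decide) (by decide) rfl) ?_
    u_omega
  case check_10e818 =>
    -- 0x10e818 load4 multiplicands[z·d+i]
    have hlt := lt_of_jg i n L14 hi31 hL14 hbr_10e86a
    have hun' : ShadowUntouched u.mem s_10e818.mem := by v_untouched
    exact check_site hsh.inv hun' (hmult i (by omega)) haddr1
  case check_10e839 =>
    -- 0x10e839 load4 output[i]
    have hlt := lt_of_jg i n L14 hi31 hL14 hbr_10e86a
    have hun' : ShadowUntouched u.mem s_10e839.mem := by v_untouched
    have hso := (hwin (by omega)).site.sub (b := (u.reg .rdx).toNat + 4 * i) (k := 4) (by omega) (by omega) (by omega)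
    exact check_site hsh.inv hun' hso haddr2
  case side_code =>
    have hlt := lt_of_jg i n L14 hi31 hL14 hbr_10e86a
    rw [haddr2]
    omega
  case check_10e84f =>
    -- 0x10e84f load4 c+0x10 (minimum_value)
    have hlt := lt_of_jg i n L14 hi31 hL14 hbr_10e86a
    have hun' : ShadowUntouched u.mem s_10e84f.mem := by v_untouched
    refine check_site hsh.inv hun' (Codebook.site_field hL hB hin 16 4 (by decide) (by decide) rfl) ?_
    u_omega
  · -- the back edge 0x10e863
    have hlt := lt_of_jg i n L14 hi31 hL14 hbr_10e86a
    have hwo' := hwo.resolve_left (by omega)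
    have hoo' := hoo.resolve_left (by omega)
    have hob' := hob.resolve_left (by omega)
    clear hwo hoo hob
    have hs' : Mem.SameExcept [⟨(u.reg .rsp).toNat - 512, (u.reg .rsp).toNat⟩,
        ⟨(u.reg .rdx).toNat, (u.reg .rdx).toNat + 4 * n⟩] s.mem s_10e863.mem := by
      u_same
    have hb' := reader_of_windows hrp.bits hs' (by
      intro w hw
      simp only [List.mem_cons, List.not_mem_nil, or_false] at hw
      rcases hw with rfl | rfl
      · simp only []
        omega
      · simp only []
        omega)
    u_loop_back [i + 1, Word.ofBV x_10e85e]
    · -- r12d = i + 1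
      rw [w_r12]
      exact counter_inc i (by omega)
    · omega
    · omega
    · -- no store to the shadow
      v_untouched
    · -- `Bits f` kept, μ not increased: the stores of this round are off `*f`
      refine ⟨hb'.1, ?_⟩
      rw [hb'.2]
      exact hrp.mu_le
    · rw [w_flags]
      simp only [X86.User.df_setStatus]
      exact w_df_10e84f
    · rw [w_mxcsr]
      exact hmx_10e859
    · rw [w_r12, counter_inc i (by omega), toNat_ofNat_small i (by omega), toNat_ofNat_small (i + 1) (by omega)]
      omega
  · -- the exit, walked to the `ret`
    refine ReachVia.done (Or.inl ?_)
    v_returned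
    · -- the post
      refine ⟨?_, ?_, ?_⟩
      · rw [w_mem]
        exact hun
      · rw [w_mem]
        exact hrp
      · right
        rw [w_rax]
        rfl


/-- The loop 0x10e8e5 (stb_vorbis_fixed.c:1853, the arm without `sequence_p`). -/
theorem loop_plain_ok {Lay : Layout} (hLay : Lay.hi = 0x1000000) {μ : Microarch} (hμ : UserX.MicroOK μ) {u₀ : State}
    (hcode : HasCodeNat Lay u₀ Vorbis.L.codebook_decode.entry Vorbis.Code.code_codebook_decode.nat Vorbis.L.codebook_decode.size)
    (hload4 : Asan.SmallCheck Lay μ Vorbis.WayInv (Vorbis.CodeOK u₀) [.rax, .rcx, .rdx] 4 Vorbis.L.__asan_load4_noabort.entry)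
    (hload8 : Asan.SmallCheck Lay μ Vorbis.WayInv (Vorbis.CodeOK u₀) [.rax, .rcx, .rdx] 8 Vorbis.L.__asan_load8_noabort.entry)
    {others : List Obj} {frames : List (Nat × FrameLayout)} {Blk : Block → Prop} {len : Nat} {u : State} {ret : Word}
    (he_ret_lt : ret < 1073741824) (he_align : (u.reg .rsp).toNat % 8 = 0)
    (he_room : 7340032 + 512 ≤ (u.reg .rsp).toNat) (he_top : (u.reg .rsp).toNat + 8 ≤ 8388608)
    (he_stack : Lay.Has (u.reg .rsp - 512) 520)
    (hbook : BookPre others frames Blk len u)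
    (n D mp zd : Nat)
    (hn : decodeLen u.mem (u.reg .rsi).toNat (argInt (u.reg .rcx)) = n)
    (hwin : 0 < n → FloatWindow others frames u.mem (u.reg .rdi).toNat (u.reg .rsi).toNat (u.reg .rdx).toNat (4 * n))
    (hnD : n ≤ D) (hD1 : 1 ≤ D)
    (hmult : ∀ i, i < D → Site (Live (stackObjs frames ++ others)) (mp + 4 * (zd + i)) 4)
    (hidx : zd + D ≤ 0x20000000)
    (L14 R15 : Word) (hL14 : (argInt L14).toNat = n) (hR15 : R15.toNat = zd)
    (s : State) (i : Nat) (x13 : Word)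
    (w_rip : s.rip = Vorbis.L.codebook_decode.loop2)
    (w_r12 : s.reg .r12 = UInt64.ofNat i) (hi : i ≤ n) (hi31 : i < 2 ^ 31)
    (w_r13 : s.reg .r13 = x13)
    (w_r14 : s.reg .r14 = L14) (w_r15 : s.reg .r15 = R15)
    (w_rbp : s.reg .rbp = u.reg .rsi) (w_rsp : s.reg .rsp = u.reg .rsp - 72)
    (w_kept : RegsKept [.r12, .r13, .r15, .rbx, .r14, .rbp, .rsp, .rax, .rcx, .rdx, .rsi, .rdi, .r8,
      .r9, .r10, .r11, .r16, .r17, .r18, .r19, .r20, .r21, .r22, .r23, .r24,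
      .r25, .r26, .r27, .r28, .r29, .r30, .r31] u s)
    (w_eq : Mem.EqOn Vorbis.L.textLo Vorbis.L.textHi u₀.mem s.mem)
    (hsame : Mem.SameExcept [⟨(u.reg .rsp).toNat - 512, (u.reg .rsp).toNat⟩,
      ⟨(u.reg .rdi).toNat + 48, (u.reg .rdi).toNat + 56⟩, ⟨(u.reg .rdi).toNat + 84, (u.reg .rdi).toNat + 96⟩,
      ⟨(u.reg .rdi).toNat + 136, (u.reg .rdi).toNat + 144⟩, ⟨(u.reg .rdi).toNat + 1484, (u.reg .rdi).toNat + 1749⟩,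
      ⟨(u.reg .rdi).toNat + 1752, (u.reg .rdi).toNat + 1784⟩,
      ⟨(u.reg .rdx).toNat, (u.reg .rdx).toNat + 4 * n⟩] u.mem s.mem)
    (hun : ShadowUntouched u.mem s.mem)
    (hrp : ReaderPost Blk len u.mem s.mem (u.reg .rdi).toNat)
    (hs0 : UInt64.ofNat (s.mem.readLE (u.reg .rsp) 8) = ret)
    (hs1 : UInt64.ofNat (s.mem.readLE (u.reg .rsp - 8) 8) = u.reg .r15)
    (hs2 : UInt64.ofNat (s.mem.readLE (u.reg .rsp - 16) 8) = u.reg .r14)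
    (hs3 : UInt64.ofNat (s.mem.readLE (u.reg .rsp - 24) 8) = u.reg .r13)
    (hs4 : UInt64.ofNat (s.mem.readLE (u.reg .rsp - 32) 8) = u.reg .r12)
    (hs5 : UInt64.ofNat (s.mem.readLE (u.reg .rsp - 40) 8) = u.reg .rbp)
    (hs6 : UInt64.ofNat (s.mem.readLE (u.reg .rsp - 48) 8) = u.reg .rbx)
    (hsout : UInt64.ofNat (s.mem.readLE (u.reg .rsp - 72) 8) = u.reg .rdx)
    (hM : s.mem.readLE (u.reg .rsi + 32) 8 = mp)
    (hdf : s.flags .df = false) (hmx : s.mxcsr &&& 0x1F80 = 0x1F80) :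
    ReachVia Lay μ Vorbis.WayInv s (Returned (Vorbis.conv u₀) (codebook_decode.spec others frames Blk len) u ret) := by
  have hsh : ShadowPre others frames u := hbook.reader.shadow
  have hsp := hsh.rsp
  have hwf := hbook.reader.where_obj
  have hwc := book_where hbook (by omega)
  obtain ⟨B, hB, hin⟩ := hbook.book
  have hL := hbook.reader.env.live
  -- where the multiplicands are
  have hwm := site_where hsh.inv hsh.offText (by omega) (hmult 0 (by omega))
  have etext : L.textHi = 0x119d40 := rfl
  -- where the output window is, and what it does not meet: one arithmetic fact each (nothing is known when `len' = 0`)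
  have hwo : n = 0 ∨ (0x119d40 ≤ (u.reg .rdx).toNat ∧ (u.reg .rdx).toNat + 4 * n ≤ 0xC00000 ∧
      ((u.reg .rsp).toNat + 8 ≤ (u.reg .rdx).toNat ∨ (u.reg .rdx).toNat + 4 * n ≤ 0x700000 ∨
        0x800000 ≤ (u.reg .rdx).toNat)) := by
    by_cases hn0 : n = 0
    · exact Or.inl hn0
    · have hw := site_where hsh.inv hsh.offText (by omega) (hwin (by omega)).site
      exact Or.inr (by omega)
  have hoo : n = 0 ∨ ((u.reg .rdx).toNat + 4 * n ≤ (u.reg .rdi).toNat ∨ (u.reg .rdi).toNat + 1808 ≤ (u.reg .rdx).toNat) := by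
    by_cases hn0 : n = 0
    · exact Or.inl hn0
    · have hw := (hwin (by omega)).offObj
      simp only [vblock, voff] at hw
      exact Or.inr hw
  have hob : n = 0 ∨ ((u.reg .rdx).toNat + 4 * n ≤ (u.reg .rsi).toNat ∨ (u.reg .rsi).toNat + 2120 ≤ (u.reg .rdx).toNat) := by
    by_cases hn0 : n = 0
    · exact Or.inl hn0
    · have hw := (hwin (by omega)).offBook
      simp only [vblock, voff] at hw
      exact Or.inr hw
  u_loop [i, x13] (fun v => n - (v.reg .r12).toNat)
  -- the two element addresses of this round, as numbers
  have haddr1 := addr_mult i zd mp R15 hR15 (by omega) (by omega)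
  have haddr2 : (u.reg .rdx + Word.ofBV (BitVec.signExtend 64 (Word.part .w32 (UInt64.ofNat i))) * 4).toNat =
      (u.reg .rdx).toNat + 4 * i := by
    have hlt := (u.reg .rdx).toNat_lt
    exact addr_out _ i hi31 (by omega)
  u_walk hcode [hμ.vendor] until [Vorbis.L.codebook_decode.loop2] span [Vorbis.L.textLo, Vorbis.L.textHi] side (v_side)
  case check_10e89c =>
    -- 0x10e89c load4 output[i]
    have hlt := lt_of_jg i n L14 hi31 hL14 hbr_10e8e8
    have hun' : ShadowUntouched u.mem s_10e89c.mem := by v_untouched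
    have hso := (hwin (by omega)).site.sub (b := (u.reg .rdx).toNat + 4 * i) (k := 4) (by omega) (by omega) (by omega)
    exact check_site hsh.inv hun' hso haddr2
  case check_10e8b1 =>
    -- 0x10e8b1 load8 c+0x20 (multiplicands): inside the struct at c
    have hlt := lt_of_jg i n L14 hi31 hL14 hbr_10e8e8
    have hun' : ShadowUntouched u.mem s_10e8b1.mem := by v_untouched
    refine check_site hsh.inv hun' (Codebook.site_field hL hB hin 32 8 (by decide) (by decide) rfl) ?_
    u_omega
  case check_10e8c8 =>
    -- 0x10e8c8 load4 multiplicands[z·d+i]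
    have hlt := lt_of_jg i n L14 hi31 hL14 hbr_10e8e8
    have hun' : ShadowUntouched u.mem s_10e8c8.mem := by v_untouched
    exact check_site hsh.inv hun' (hmult i (by omega)) haddr1
  case side_code =>
    -- the store 0x10e8db `movss [r13], xmm0` misses the text
    have hlt := lt_of_jg i n L14 hi31 hL14 hbr_10e8e8
    rw [haddr2]
    omega
  · -- the back edge 0x10e8e1
    have hlt := lt_of_jg i n L14 hi31 hL14 hbr_10e8e8
    have hwo' := hwo.resolve_left (by omega)
    have hoo' := hoo.resolve_left (by omega)
    have hob' := hob.resolve_left (by omega)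
    clear hwo hoo hob
    have hs' : Mem.SameExcept [⟨(u.reg .rsp).toNat - 512, (u.reg .rsp).toNat⟩,
        ⟨(u.reg .rdx).toNat, (u.reg .rdx).toNat + 4 * n⟩] s.mem s_10e8e1.mem := by
      u_same
    have hb' := reader_of_windows hrp.bits hs' (by
      intro w hw
      simp only [List.mem_cons, List.not_mem_nil, or_false] at hw
      rcases hw with rfl | rfl
      · simp only []
        omega
      · simp only []
        omega)
    u_loop_back [i + 1, u.reg .rdx + Word.ofBV (BitVec.signExtend 64 (Word.part .w32 (UInt64.ofNat i))) * 4]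
    · -- r12d = i + 1
      rw [w_r12]
      exact counter_inc i (by omega)
    · omega
    · omega
    · -- no store to the shadow
      v_untouched
    · -- `Bits f` kept, μ not increased: the stores of this round are off `*f`
      refine ⟨hb'.1, ?_⟩
      rw [hb'.2]
      exact hrp.mu_le
    · rw [w_flags]
      simp only [X86.User.df_setStatus]
      exact w_df_10e8c8
    · rw [w_mxcsr]
      exact hmx_10e8d5
    · rw [w_r12, counter_inc i (by omega), toNat_ofNat_small i (by omega), toNat_ofNat_small (i + 1) (by omega)]
      omega
  · -- the exit, walked to the `ret`
    refine ReachVia.done (Or.inl ?_)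
    v_returned
    · -- the post
      refine ⟨?_, ?_, ?_⟩
      · rw [w_mem]
        exact hun
      · rw [w_mem]
        exact hrp
      · right
        rw [w_rax]
        rfl

end Vorbis.Spec.codebook_decode
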